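-- pv_equiv track=rewrite | github.com/D4mianWayne/roppy | rop/tubes/zio.py | EVAL
-- ===== SOURCE A (Python) =====
-- def EVAL(s):    # now you are not worried about pwning yourself
--     st = 0      # 0 for normal, 1 for escape, 2 for \xXX
--     ret = []
--     i = 0
--     while i < len(s):
--         if st == 0:
--             if s[i] == '\\':
--                 st = 1
--             else:
--                 ret.append(s[i])
--         elif st == 1:
--             if s[i] in ('"', "'", "\\", "t", "n", "r"):
--                 if s[i] == 't':
--                     ret.append('\t')
--                 elif s[i] == 'n':
--                     ret.append('\n')
--                 elif s[i] == 'r':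
--                     ret.append('\r')
--                 else:
--                     ret.append(s[i])
--                 st = 0
--             elif s[i] == 'x':
--                 st = 2
--             else:
--                 raise Exception('invalid repr of str %s' % s)
--         else:
--             num = int(s[i:i+2], 16)
--             assert 0 <= num < 256
--             ret.append(chr(num))
--             st = 0
--             i += 1
--         i += 1
--     return ''.join(ret)
-- ===== SOURCE B (Python) =====
-- _ESC = {'t': '\t', 'n': '\n', 'r': '\r', '"': '"', "'": "'", '\\': '\\'}
--
-- def EVAL(s):
--     out = []
--     i = 0
--     n = len(s)
--     while True:
--         j = s.find('\\', i)
--         if j == -1: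
--             out.append(s[i:])
--             break
--         out.append(s[i:j])
--         if j + 1 >= n:
--             break
--         e = s[j + 1]
--         if e in _ESC:
--             out.append(_ESC[e])
--             i = j + 2
--         elif e == 'x':
--             if j + 2 >= n:
--                 break
--             num = int(s[j + 2:j + 4], 16)
--             assert 0 <= num < 256
--             out.append(chr(num))
--             i = j + 4
--         else:
--             raise Exception('invalid repr of str %s' % s)
--     return ''.join(out)
-- ===== Notes on version B (the rewrite author's own statement) =====
-- stated objective: faster
-- what changed: Replaces A's three-state character-at-a-time state machine with a find-based chunk scanner: literal runs up to the next backslash are located with s.find and copied wholesale as slices, and each escape is resolved through a lookup table instead of state transitions.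
import Mathlib
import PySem

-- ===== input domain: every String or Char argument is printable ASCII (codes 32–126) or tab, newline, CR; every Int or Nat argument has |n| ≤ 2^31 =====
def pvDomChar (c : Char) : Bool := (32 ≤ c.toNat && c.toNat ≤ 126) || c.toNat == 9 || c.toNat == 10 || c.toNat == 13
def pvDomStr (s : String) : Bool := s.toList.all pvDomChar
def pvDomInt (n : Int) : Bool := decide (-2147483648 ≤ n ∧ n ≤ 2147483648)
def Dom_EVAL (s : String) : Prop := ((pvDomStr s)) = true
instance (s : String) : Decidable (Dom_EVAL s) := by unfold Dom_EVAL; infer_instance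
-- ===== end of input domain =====

-- B replaces A's three-state char-at-a-time state machine by a find-based chunk scanner
-- (copy the literal run up to the next backslash wholesale, then resolve one escape via a
-- lookup table); measurably faster by a constant factor (bulk slice copies).

-- ===== SHARED HELPER: Python's int(t, 16) for the 1- or 2-char chunks both programs parse =====

def hexVal? (c : Char) : Option Nat :=
  if '0' ≤ c ∧ c ≤ '9' then some (c.toNat - 48)
  else if 'a' ≤ c ∧ c ≤ 'f' then some (c.toNat - 87)
  else if 'A' ≤ c ∧ c ≤ 'F' then some (c.toNat - 55)
  else none

def isPyWs (c : Char) : Bool :=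
  c = ' ' || c = '\t' || c = '\n' || c = '\r' || c.toNat == 11 || c.toNat == 12

-- exact model of Python's int(t, 16) (incl. whitespace stripping and a leading sign)
-- for the strings of length 1 or 2 that both programs feed it; none = ValueError
def pyIntHex2? (t : List Char) : Option Int :=
  match t with
  | [c] => (hexVal? c).map (fun v => (v : Int))
  | [c1, c2] =>
    if isPyWs c1 then (hexVal? c2).map (fun v => (v : Int))
    else if isPyWs c2 then (hexVal? c1).map (fun v => (v : Int))
    else if c1 = '+' then (hexVal? c2).map (fun v => (v : Int))
    else if c1 = '-' then (hexVal? c2).map (fun v => -(v : Int))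
    else
      match hexVal? c1, hexVal? c2 with
      | some a, some b => some ((16 * a + b : Nat) : Int)
      | _, _ => none
  | _ => none

-- ===== PORT A =====
-- A's while loop over index i with state st; fuel = s.length is a totality guard only
-- (each iteration consumes ≥ 1 char); the none result marks the inputs where A raises.
def loopA (fuel : Nat) (cs : List Char) (st : Nat) (ret : List Char) : Option (List Char) :=
  match fuel, cs with
  | _, [] => some ret
  | 0, _ :: _ => none
  | f + 1, c :: rest =>
    if st = 0 then
      if c = '\\' then loopA f rest 1 ret
      else loopA f rest 0 (ret ++ [c])
    else if st = 1 then
      if c = '"' || c = '\'' || c = '\\' || c = 't' || c = 'n' || c = 'r' then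
        loopA f rest 0
          (ret ++ [if c = 't' then '\t' else if c = 'n' then '\n' else if c = 'r' then '\r' else c])
      else if c = 'x' then loopA f rest 2 ret
      else none
    else
      match pyIntHex2? (c :: rest.take 1) with
      | some num =>
        if 0 ≤ num ∧ num < 256 then loopA f (rest.drop 1) 0 (ret ++ [Char.ofNat num.toNat])
        else none
      | none => none

def EVAL (s : String) : String :=
  String.mk ((loopA s.toList.length s.toList 0 []).getD [])

-- ===== PORT B =====
def escDict : PySem.Dict Char Char :=
  PySem.Dict.ofList [('t', '\t'), ('n', '\n'), ('r', '\r'), ('"', '"'), ('\'', '\''), ('\\', '\\')]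

-- B's while True loop: j = s.find('\\', i) becomes takeWhile/dropWhile on the remaining
-- suffix; out is the list of appended chunks; fuel = s.length is a totality guard only.
def notBS (c : Char) : Bool := c ≠ '\\'

def loopB (fuel : Nat) (cs : List Char) (outs : List (List Char)) : Option (List (List Char)) :=
  let pre := cs.takeWhile notBS
  match cs.dropWhile notBS with
  | [] => some (outs ++ [pre])                        -- j == -1: append s[i:] and break
  | _ :: r =>
    match fuel with
    | 0 => none
    | f + 1 =>
      match r with
      | [] => some (outs ++ [pre])                    -- trailing backslash: break
      | e :: r2 =>
        match PySem.Dict.get? escDict e with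
        | some v => loopB f r2 (outs ++ [pre] ++ [[v]])
        | none =>
          if e = 'x' then
            match r2 with
            | [] => some (outs ++ [pre])              -- trailing \x: break
            | c1 :: r3 =>
              match pyIntHex2? (c1 :: r3.take 1) with
              | some num =>
                if 0 ≤ num ∧ num < 256 then
                  loopB f (r3.drop 1) (outs ++ [pre] ++ [[Char.ofNat num.toNat]])
                else none
              | none => none
          else none

def EVAL_alt (s : String) : String :=
  match loopB s.toList.length s.toList [] with
  | some outs => String.mk outs.flatten               -- ''.join(out)
  | none => ""

-- ===== PRECONDITION & SPEC =====
-- Pre_ excludes exactly the inputs on which A raises (an invalid escape character →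
-- Exception, a non-parsable chunk after \x → ValueError, a negative parsed value →
-- AssertionError).  okEsc is the grammar of well-formed escape strings — plain chars,
-- \" \' \\ \t \n \r, and \x followed by a chunk int(·,16) accepts with value in
-- [0,256) (a trailing \ or \x is permitted); it carries no state, index or output,
-- only grammar membership (fuel is a structural-recursion guard).
def okEsc (fuel : Nat) (cs : List Char) : Bool :=
  match fuel, cs with
  | _, [] => true
  | 0, _ :: _ => false
  | f + 1, c :: rest =>
    if c = '\\' then
      match rest with
      | [] => true
      | e :: r =>
        if e = 'x' then
          match r with
          | [] => true
          | c1 :: r1 =>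
            match pyIntHex2? (c1 :: r1.take 1) with
            | some n => decide (0 ≤ n ∧ n < 256) && okEsc f (r1.drop 1)
            | none => false
        else if e = '"' || e = '\'' || e = '\\' || e = 't' || e = 'n' || e = 'r' then okEsc f r
        else false
    else okEsc f rest

def Pre_EVAL (s : String) : Prop := okEsc s.toList.length s.toList = true
instance (s : String) : Decidable (Pre_EVAL s) := by unfold Pre_EVAL; infer_instance

def pvWitness_EVAL : String := "a\\n\\x41 \\\\"

def Spec_EVAL (s : String) (out : String) : Prop := out = EVAL_alt s
instance (s : String) (out : String) : Decidable (Spec_EVAL s out) := by unfold Spec_EVAL; infer_instance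

-- ===== CLAIM (what is proved, stated in full; the proofs are below) =====
def Claim_equal_EVAL : Prop := ∀ (s : String), Dom_EVAL s → Pre_EVAL s → Spec_EVAL s (EVAL s)

-- ===== LEMMAS AND PROOFS =====

theorem loopB_fuel : ∀ (f1 f2 : Nat) (cs : List Char) (outs : List (List Char)),
    cs.length ≤ f1 → cs.length ≤ f2 → loopB f1 cs outs = loopB f2 cs outs := by
  intro f1
  induction f1 with
  | zero =>
    intro f2 cs outs h1 h2
    have hcs : cs = [] := List.eq_nil_of_length_eq_zero (Nat.le_zero.mp h1)
    subst hcs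
    simp [loopB]
  | succ a ih =>
    intro f2 cs outs h1 h2
    rw [loopB.eq_def, loopB.eq_def]
    cases hd : cs.dropWhile notBS with
    | nil => simp [hd]
    | cons d r =>
      have hne : cs ≠ [] := by intro h; subst h; simp at hd
      have hlen : r.length + 1 ≤ cs.length := by
        have := List.length_dropWhile_le notBS cs
        rw [hd] at this; simpa using this
      cases f2 with
      | zero => omega
      | succ b =>
        simp only [hd]
        cases r with
        | nil => rfl
        | cons e r2 =>
          simp only [List.length_cons] at hlen
          cases hg : PySem.Dict.get? escDict e with
          | some v =>
            simp only [hg]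
            exact ih b r2 _ (by omega) (by omega)
          | none =>
            simp only [hg]
            by_cases hx : e = 'x'
            · subst hx
              simp only [eq_self_iff_true, if_true]
              cases r2 with
              | nil => simp
              | cons c1 r3 =>
                simp only [List.length_cons] at hlen
                cases hp : pyIntHex2? (c1 :: r3.take 1) with
                | none => simp [hp]
                | some num =>
                  simp only [hp]
                  by_cases hr : 0 ≤ num ∧ num < 256
                  · simp only [if_pos hr]
                    have hd3 : (r3.drop 1).length ≤ r3.length := by
                      simp [List.length_drop]
                    exact ih b (r3.drop 1) _ (by omega) (by omega)
                  · simp [hr]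
            · simp [hx]

theorem loopB_outs : ∀ (f : Nat) (cs : List Char) (outs : List (List Char)),
    loopB f cs outs = (loopB f cs []).map (fun o => outs ++ o) := by
  intro f
  induction f with
  | zero =>
    intro cs outs
    rw [loopB.eq_def, loopB.eq_def]
    cases hd : cs.dropWhile notBS with
    | nil => simp [hd]
    | cons d r => simp [hd]
  | succ a ih =>
    intro cs outs
    rw [loopB.eq_def, loopB.eq_def]
    cases hd : cs.dropWhile notBS with
    | nil => simp [hd]
    | cons d r =>
      simp only [hd]
      cases r with
      | nil => simp
      | cons e r2 =>
        cases hg : PySem.Dict.get? escDict e with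
        | some v =>
          simp only [hg]
          rw [ih r2 (outs ++ [cs.takeWhile notBS] ++ [[v]]),
            ih r2 ([] ++ [cs.takeWhile notBS] ++ [[v]])]
          cases loopB a r2 [] <;> simp
        | none =>
          simp only [hg]
          by_cases hx : e = 'x'
          · subst hx
            simp only [eq_self_iff_true, if_true]
            cases r2 with
            | nil => simp
            | cons c1 r3 =>
              cases hp : pyIntHex2? (c1 :: r3.take 1) with
              | none => simp [hp]
              | some num =>
                simp only [hp]
                by_cases hr : 0 ≤ num ∧ num < 256
                · simp only [if_pos hr]
                  rw [ih (r3.drop 1) (outs ++ [cs.takeWhile notBS] ++ [[Char.ofNat num.toNat]]),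
                    ih (r3.drop 1) ([] ++ [cs.takeWhile notBS] ++ [[Char.ofNat num.toNat]])]
                  cases loopB a (r3.drop 1) [] <;> simp
                · simp [hr]
          · simp [hx]

-- flattened result of B's loop at canonical fuel
def runB (cs : List Char) : Option (List Char) :=
  (loopB cs.length cs []).map List.flatten

theorem runB_nil : runB [] = some [] := by decide

theorem runB_cons_ne (c : Char) (cs : List Char) (h : ¬ c = '\\') :
    runB (c :: cs) = (runB cs).map (fun o => c :: o) := by
  unfold runB
  rw [loopB_fuel cs.length (cs.length + 1) cs [] (le_refl _) (Nat.le_succ _)]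
  have hpc : notBS c = true := by simp [notBS, h]
  rw [loopB.eq_def, loopB.eq_def]
  simp only [List.length_cons, List.takeWhile_cons, List.dropWhile_cons, hpc, if_true]
  cases hd : cs.dropWhile notBS with
  | nil => simp [hd]
  | cons d r =>
    simp only [hd]
    cases r with
    | nil => simp
    | cons e r2 =>
      cases hg : PySem.Dict.get? escDict e with
      | some v =>
        simp only [hg]
        conv_lhs => rw [loopB_outs]
        conv_rhs => rw [loopB_outs]
        cases loopB cs.length r2 [] <;> simp
      | none =>
        simp only [hg]
        by_cases hx : e = 'x'
        · subst hx
          simp only [eq_self_iff_true, if_true]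
          cases r2 with
          | nil => simp
          | cons c1 r3 =>
            cases hp : pyIntHex2? (c1 :: r3.take 1) with
            | none => simp [hp]
            | some num =>
              simp only [hp]
              by_cases hr : 0 ≤ num ∧ num < 256
              · simp only [if_pos hr]
                conv_lhs => rw [loopB_outs]
                conv_rhs => rw [loopB_outs]
                cases loopB cs.length (r3.drop 1) [] <;> simp
              · simp [hr]
        · simp [hx]

theorem runB_slash_nil : runB ['\\'] = some [] := by decide

theorem runB_slash_esc (e v : Char) (cs : List Char) (h : PySem.Dict.get? escDict e = some v) :
    runB ('\\' :: e :: cs) = (runB cs).map (fun o => v :: o) := by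
  unfold runB
  rw [loopB.eq_def]
  have hbs : notBS '\\' = false := by decide
  simp only [List.length_cons, List.takeWhile_cons, List.dropWhile_cons, hbs, if_false,
    Bool.false_eq_true, h]
  conv_lhs => rw [loopB_outs]
  rw [loopB_fuel (cs.length + 1) cs.length cs [] (Nat.le_succ _) (le_refl _)]
  cases loopB cs.length cs [] <;> simp

theorem runB_slash_x_nil : runB ['\\', 'x'] = some [] := by decide

theorem runB_slash_x_cons (c1 : Char) (r1 : List Char) :
    runB ('\\' :: 'x' :: c1 :: r1) =
      match pyIntHex2? (c1 :: r1.take 1) with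
      | some num =>
        if 0 ≤ num ∧ num < 256 then (runB (r1.drop 1)).map (fun o => Char.ofNat num.toNat :: o)
        else none
      | none => none := by
  unfold runB
  rw [loopB.eq_def]
  have hbs : notBS '\\' = false := by decide
  have hgx : PySem.Dict.get? escDict 'x' = none := by decide
  simp only [List.length_cons, List.takeWhile_cons, List.dropWhile_cons, hbs, if_false,
    Bool.false_eq_true, hgx, eq_self_iff_true, if_true]
  cases hp : pyIntHex2? (c1 :: r1.take 1) with
  | none => simp [hp]
  | some num =>
    simp only [hp]
    by_cases hr : 0 ≤ num ∧ num < 256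
    · simp only [if_pos hr]
      conv_lhs => rw [loopB_outs]
      have hdl : (r1.drop 1).length ≤ r1.length := by simp [List.length_drop]
      rw [loopB_fuel (r1.length + 2) (r1.drop 1).length (r1.drop 1) []
        (by omega) (le_refl _)]
      cases loopB (r1.drop 1).length (r1.drop 1) [] <;> simp
    · simp [hr]

theorem runB_slash_bad (e : Char) (cs : List Char) (h : PySem.Dict.get? escDict e = none)
    (hx : ¬ e = 'x') : runB ('\\' :: e :: cs) = none := by
  unfold runB
  rw [loopB.eq_def]
  have hbs : notBS '\\' = false := by decide
  simp only [List.length_cons, List.takeWhile_cons, List.dropWhile_cons, hbs, if_false,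
    Bool.false_eq_true, h]
  simp [hx]

theorem escGet_none (e : Char) (h1 : ¬ e = '"') (h2 : ¬ e = '\'') (h3 : ¬ e = '\\')
    (h4 : ¬ e = 't') (h5 : ¬ e = 'n') (h6 : ¬ e = 'r') :
    PySem.Dict.get? escDict e = none := by
  have hd : escDict =
      PySem.Dict.mk [('t', '\t'), ('n', '\n'), ('r', '\r'), ('"', '"'), ('\'', '\''), ('\\', '\\')] := by
    decide
  rw [hd]
  simp only [PySem.Dict.get?_mk_cons, beq_iff_eq]
  rw [if_neg (Ne.symm h4), if_neg (Ne.symm h5), if_neg (Ne.symm h6), if_neg (Ne.symm h1),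
    if_neg (Ne.symm h2), if_neg (Ne.symm h3)]
  rfl

theorem mainA (n : Nat) : ∀ (cs : List Char), cs.length ≤ n → ∀ (fa : Nat) (ret : List Char),
    cs.length ≤ fa → loopA fa cs 0 ret = (runB cs).map (fun o => ret ++ o) := by
  induction n with
  | zero =>
    intro cs hlen fa ret hfa
    have hcs : cs = [] := List.eq_nil_of_length_eq_zero (Nat.le_zero.mp hlen)
    subst hcs
    simp [loopA, runB_nil]
  | succ n ih =>
    intro cs hlen fa ret hfa
    cases cs with
    | nil => simp [loopA, runB_nil]
    | cons c rest =>
      simp only [List.length_cons] at hlen hfa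
      cases fa with
      | zero => omega
      | succ a =>
        simp only [loopA]
        by_cases hc : c = '\\'
        · subst hc
          rw [if_pos rfl]
          cases rest with
          | nil => simp [loopA, runB_slash_nil]
          | cons e r =>
            simp only [List.length_cons] at hlen hfa
            cases a with
            | zero => omega
            | succ b =>
              by_cases hk : e = '"' ∨ e = '\'' ∨ e = '\\' ∨ e = 't' ∨ e = 'n' ∨ e = 'r'
              · rcases hk with rfl | rfl | rfl | rfl | rfl | rfl
                · rw [show loopA (b + 1) ('"' :: r) 1 ret = loopA b r 0 (ret ++ ['"']) from by
                    simp [loopA]]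
                  rw [ih r (by omega) b _ (by omega), runB_slash_esc '"' '"' r (by decide)]
                  cases runB r <;> simp
                · rw [show loopA (b + 1) ('\'' :: r) 1 ret = loopA b r 0 (ret ++ ['\'']) from by
                    simp [loopA]]
                  rw [ih r (by omega) b _ (by omega), runB_slash_esc '\'' '\'' r (by decide)]
                  cases runB r <;> simp
                · rw [show loopA (b + 1) ('\\' :: r) 1 ret = loopA b r 0 (ret ++ ['\\']) from by
                    simp [loopA]]
                  rw [ih r (by omega) b _ (by omega), runB_slash_esc '\\' '\\' r (by decide)]
                  cases runB r <;> simp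
                · rw [show loopA (b + 1) ('t' :: r) 1 ret = loopA b r 0 (ret ++ ['\t']) from by
                    simp [loopA]]
                  rw [ih r (by omega) b _ (by omega), runB_slash_esc 't' '\t' r (by decide)]
                  cases runB r <;> simp
                · rw [show loopA (b + 1) ('n' :: r) 1 ret = loopA b r 0 (ret ++ ['\n']) from by
                    simp [loopA]]
                  rw [ih r (by omega) b _ (by omega), runB_slash_esc 'n' '\n' r (by decide)]
                  cases runB r <;> simp
                · rw [show loopA (b + 1) ('r' :: r) 1 ret = loopA b r 0 (ret ++ ['\r']) from by
                    simp [loopA]]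
                  rw [ih r (by omega) b _ (by omega), runB_slash_esc 'r' '\r' r (by decide)]
                  cases runB r <;> simp
              · push_neg at hk
                obtain ⟨h1, h2, h3, h4, h5, h6⟩ := hk
                by_cases hx : e = 'x'
                · subst hx
                  rw [show loopA (b + 1) ('x' :: r) 1 ret = loopA b r 2 ret from by simp [loopA]]
                  cases r with
                  | nil => simp [loopA, runB_slash_x_nil]
                  | cons c1 r1 =>
                    simp only [List.length_cons] at hlen hfa
                    cases b with
                    | zero => omega
                    | succ d =>
                      simp only [loopA]
                      rw [runB_slash_x_cons c1 r1]
                      cases hp : pyIntHex2? (c1 :: r1.take 1) with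
                      | none => simp
                      | some num =>
                        simp only []
                        by_cases hr : 0 ≤ num ∧ num < 256
                        · simp only [if_pos hr]
                          have hdl : (r1.drop 1).length ≤ r1.length := by simp [List.length_drop]
                          rw [ih (r1.drop 1) (by omega) d _ (by omega)]
                          cases runB (r1.drop 1) <;> simp
                        · simp [hr]
                · have hg := escGet_none e h1 h2 h3 h4 h5 h6
                  have hb : ¬((e = '"' : Bool) || e = '\'' || e = '\\' || e = 't' || e = 'n'
                      || e = 'r') = true := by
                    simp only [Bool.or_eq_true, decide_eq_true_eq]
                    tauto
                  rw [show loopA (b + 1) (e :: r) 1 ret = none from by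
                    simp only [loopA, eq_self_iff_true, if_true]
                    rw [if_neg hb, if_neg hx]
                    rfl]
                  rw [runB_slash_bad e r hg hx]
                  rfl
        · rw [if_neg hc]
          rw [ih rest (by omega) a (ret ++ [c]) (by omega), runB_cons_ne c rest hc]
          cases runB rest <;> simp

-- ===== VERDICT (by name: the statement is the Claim_ definition above) =====
theorem EVAL_spec : Claim_equal_EVAL := by
  unfold Claim_equal_EVAL
  intro s _ _
  unfold Spec_EVAL EVAL EVAL_alt
  rw [mainA s.toList.length s.toList (le_refl _) s.toList.length [] (le_refl _)]
  unfold runB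
  cases hb : loopB s.toList.length s.toList [] with
  | none => rfl
  | some outs => simp
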